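-- pv_equiv track=rewrite | github.com/meeshkan/hmt | hmt/serve/mock/matcher.py | cut_path
-- ===== SOURCE A (Python) =====
-- from typing import Optional, Sequence, Tuple
--
-- def cut_path(paths: Sequence[str], path: str) -> str:
--     return (
--         path
--         if len(paths) == 0
--         else path[len(paths[0]) :]
--         if path[: len(paths[0])] == paths[0]
--         else cut_path(paths[1:], path)
--     )
-- ===== SOURCE B (Python) =====
-- def cut_path(paths, path):
--     p = next((q for q in paths if path.startswith(q)), None)
--     return path if p is None else path[len(p):]
-- ===== Notes on version B (the rewrite author's own statement) =====
-- stated objective: faster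
-- what changed: Replaces the tail recursion over paths[1:] (which copies the remaining list at every step and recurses) with a single next()/generator search for the first prefix via str.startswith, then one slice.
import Mathlib
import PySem

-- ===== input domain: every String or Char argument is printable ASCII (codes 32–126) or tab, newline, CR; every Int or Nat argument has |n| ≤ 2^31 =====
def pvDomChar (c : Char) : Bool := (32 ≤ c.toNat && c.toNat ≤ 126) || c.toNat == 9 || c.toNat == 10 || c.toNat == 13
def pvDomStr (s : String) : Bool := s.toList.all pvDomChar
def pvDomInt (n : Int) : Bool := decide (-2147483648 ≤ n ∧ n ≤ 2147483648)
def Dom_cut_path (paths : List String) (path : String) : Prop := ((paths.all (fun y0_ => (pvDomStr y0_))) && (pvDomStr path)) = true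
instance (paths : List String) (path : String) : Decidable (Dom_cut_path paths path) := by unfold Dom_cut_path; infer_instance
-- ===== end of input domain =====

-- B replaces A's tail recursion over paths[1:] with a single find-first-prefix
-- search (next(...)/startswith) followed by one slice; return value only, same result.

-- ===== PORT A =====
-- A: if len(paths)==0 return path; if path[:len(paths[0])] == paths[0] return
-- path[len(paths[0]):]; else recurse on paths[1:].
def cut_path (paths : List String) (path : String) : String :=
  match paths with
  | [] => path
  | p :: rest =>
    if PySem.Str.slice path none (some (p.length : Int)) = p
    then PySem.Str.slice path (some (p.length : Int)) none
    else cut_path rest path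

-- ===== PORT B =====
-- B: p = next((q for q in paths if path.startswith(q)), None); slice once.
def cut_path_alt (paths : List String) (path : String) : String :=
  match paths.find? (fun q => PySem.Str.startswith path q) with
  | some p => PySem.Str.slice path (some (p.length : Int)) none
  | none => path

-- ===== PRECONDITION & SPEC =====
def Spec_cut_path (paths : List String) (path : String) (out : String) : Prop := out = cut_path_alt paths path
instance (paths : List String) (path : String) (out : String) : Decidable (Spec_cut_path paths path out) := by unfold Spec_cut_path; infer_instance

-- ===== CLAIM (what is proved, stated in full; the proofs are below) =====
def Claim_equal_cut_path : Prop := ∀ (paths : List String) (path : String), Dom_cut_path paths path → Spec_cut_path paths path (cut_path paths path)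

-- ===== LEMMAS AND PROOFS =====

-- A's slice-equality prefix test agrees with B's startswith.
theorem slice_eq_iff_startswith (path p : String) :
    (PySem.Str.slice path none (some (p.length : Int)) = p)
      ↔ PySem.Str.startswith path p = true := by
  rw [PySem.Str.startswith_eq, PySem.Chars.startswith_iff]
  constructor
  · intro h
    have := congrArg String.toList h
    rw [PySem.Str.toList_slice, PySem.Chars.slice_eq_listSlice] at this
    have hl : (p.length : Int) = ((p.toList.length : Nat) : Int) := by
      rw [String.length_toList]
    rw [hl, PySem.List.slice_to_natCast] at this
    rw [List.prefix_iff_eq_take]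
    exact this.symm
  · intro h
    apply String.toList_inj.mp
    rw [PySem.Str.toList_slice, PySem.Chars.slice_eq_listSlice]
    have hl : (p.length : Int) = ((p.toList.length : Nat) : Int) := by
      rw [String.length_toList]
    rw [hl, PySem.List.slice_to_natCast]
    exact (List.prefix_iff_eq_take.mp h).symm

theorem cut_path_eq_alt (paths : List String) (path : String) :
    cut_path paths path = cut_path_alt paths path := by
  induction paths with
  | nil => rfl
  | cons p rest ih =>
    by_cases h : PySem.Str.slice path none (some (p.length : Int)) = p
    · have hs : PySem.Str.startswith path p = true :=
        (slice_eq_iff_startswith path p).mp h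
      rw [PySem.Str.startswith_eq] at hs
      simp [cut_path, cut_path_alt, h, hs]
    · have hs : PySem.Str.startswith path p = false := by
        rw [← Bool.not_eq_true]
        exact fun hc => h ((slice_eq_iff_startswith path p).mpr hc)
      rw [PySem.Str.startswith_eq] at hs
      simp only [cut_path, if_neg h, ih, cut_path_alt, List.find?_cons,
        PySem.Str.startswith_eq, hs]

-- ===== VERDICT (by name: the statement is the Claim_ definition above) =====
theorem cut_path_spec : Claim_equal_cut_path := by
  intro paths path _
  unfold Spec_cut_path
  exact cut_path_eq_alt paths path
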